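-- pv_equiv track=rewrite | github.com/Murrayp2000/bookbot | stats.py | get_appearence_count
-- ===== SOURCE A (Python) =====
-- def get_appearence_count(input_string):
-- 	char_list = []
-- 	dict = {}
-- 	for char in input_string:
-- 		char = char.lower()
-- 		if char in char_list:
-- 			count = dict[char] + 1
-- 			dict[char] = count
-- 		else:
-- 			char_list.append(char)
-- 			dict[char] = 1
-- 	return dict
-- ===== SOURCE B (Python) =====
-- def get_appearence_count(input_string):
-- 	lowered = [char.lower() for char in input_string]
-- 	return {c: lowered.count(c) for c in dict.fromkeys(lowered)}
-- ===== Notes on version B (the rewrite author's own statement) =====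
-- stated objective: simpler
-- what changed: Replaces A's single pass that maintains a seen-chars list (scanned for membership each iteration) and hand-updates a dict with a two-pass comprehension: lowercase all characters, dedup with dict.fromkeys for first-occurrence key order, and count each distinct char with list.count.
import Mathlib
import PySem

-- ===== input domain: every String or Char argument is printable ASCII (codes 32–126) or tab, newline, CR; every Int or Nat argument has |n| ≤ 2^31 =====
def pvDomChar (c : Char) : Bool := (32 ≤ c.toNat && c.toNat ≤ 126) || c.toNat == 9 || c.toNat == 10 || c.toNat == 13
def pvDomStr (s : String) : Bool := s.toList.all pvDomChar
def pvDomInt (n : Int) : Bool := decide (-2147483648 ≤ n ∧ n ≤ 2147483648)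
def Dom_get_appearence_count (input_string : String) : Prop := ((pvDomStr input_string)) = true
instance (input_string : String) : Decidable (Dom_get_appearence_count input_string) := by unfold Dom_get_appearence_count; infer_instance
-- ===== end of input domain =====

-- B replaces A's one-pass list-membership/dict accumulation by a two-pass dedup-then-count comprehension (simpler).

-- ===== PORT A =====
-- A's loop state: (char_list, dict); 'dict[char]' in the first branch cannot miss
-- (char ∈ char_list implies the key is present), so getD 0 is exact there.
def get_appearence_count (input_string : String) : List (String × Int) :=
  (input_string.toList.foldl
    (fun (st : List String × PySem.Dict String Int) char =>
      let c := PySem.Str.lower (String.ofList [char])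
      if st.1.contains c then
        let count := st.2.getD c 0 + 1
        (st.1, st.2.insert c count)
      else
        (st.1 ++ [c], st.2.insert c 1))
    ([], PySem.Dict.empty)).2.items

-- ===== PORT B =====
def get_appearence_count_alt (input_string : String) : List (String × Int) :=
  let lowered := input_string.toList.map (fun char => PySem.Str.lower (String.ofList [char]))
  (PySem.List.dedup lowered).map (fun c => (c, (lowered.count c : Int)))

-- ===== PRECONDITION & SPEC =====
def Spec_get_appearence_count (input_string : String) (out : List (String × Int)) : Prop := out = get_appearence_count_alt input_string
instance (input_string : String) (out : List (String × Int)) : Decidable (Spec_get_appearence_count input_string out) := by unfold Spec_get_appearence_count; infer_instance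

-- ===== CLAIM (what is proved, stated in full; the proofs are below) =====
def Claim_equal_get_appearence_count : Prop := ∀ (input_string : String), Dom_get_appearence_count input_string → Spec_get_appearence_count input_string (get_appearence_count input_string)

-- ===== LEMMAS AND PROOFS =====

-- A's loop keeps char_list and dict.keys in membership agreement; under that invariant
-- its dict component is exactly the insert-getD-add-one counting fold over the lowered characters.
lemma foldA_snd (ls : List Char) : ∀ (cl : List String) (d : PySem.Dict String Int),
    (∀ c, cl.contains c = d.contains c) →
    (ls.foldl
      (fun (st : List String × PySem.Dict String Int) char =>
        let c := PySem.Str.lower (String.ofList [char])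
        if st.1.contains c then
          let count := st.2.getD c 0 + 1
          (st.1, st.2.insert c count)
        else
          (st.1 ++ [c], st.2.insert c 1))
      (cl, d)).2
    = (ls.map (fun char => PySem.Str.lower (String.ofList [char]))).foldl
        (fun d x => d.insert x (d.getD x 0 + 1)) d := by
  induction ls with
  | nil => intro cl d _; rfl
  | cons ch ls ih =>
    intro cl d hinv
    simp only [List.foldl_cons, List.map_cons]
    generalize (PySem.Str.lower (String.ofList [ch])) = c
    by_cases hc : cl.contains c = true
    · simp only [hc, if_true]
      exact ih cl (d.insert c (d.getD c 0 + 1)) (by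
        intro c'
        rw [PySem.Dict.contains_insert, ← hinv c']
        by_cases h : c' = c
        · subst h; simpa using hc
        · simp [h])
    · have hdc : d.contains c = false := by rw [← hinv c]; exact eq_false_of_ne_true hc
      simp only [eq_false_of_ne_true hc, Bool.false_eq_true, if_false]
      rw [show d.getD c 0 = 0 from PySem.Dict.getD_of_not_contains _ _ hdc]
      exact ih (cl ++ [c]) (d.insert c (0 + 1)) (by
        intro c'
        rw [PySem.Dict.contains_insert, ← hinv c']
        by_cases h : c' = c
        · subst h; simp
        · simp [h])

-- ===== VERDICT (by name: the statement is the Claim_ definition above) =====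
theorem get_appearence_count_spec : Claim_equal_get_appearence_count := by
  intro s _
  unfold Spec_get_appearence_count get_appearence_count get_appearence_count_alt
  rw [foldA_snd s.toList [] PySem.Dict.empty (by intro c; simp [PySem.Dict.contains_empty])]
  rw [PySem.Dict.foldl_insert_getD_add_one_eq_counter, PySem.Dict.items_counter]
  simp [PySem.List.dedup_eq_ofList]
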